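-- pv_equiv track=rewrite | github.com/DFUZZ-ICSE/DFUZZ | gen_program/gen_prompts_for_mutators.py | add_suffix_to_type
-- ===== SOURCE A (Python) =====
-- def add_suffix_to_type(s, types):
--     possible_types = []
--
--     for cur_type in types.keys():
--         count = types[cur_type]
--         result = ""
--         i = 0
--         while i < len(s):
--             if s[i:i+len(cur_type)].lower() == cur_type:
--
--                 result += s[i:i+len(cur_type)] + "_" + str(count)
--                 count += 1
--                 i += len(cur_type)
--
--                 types[cur_type] += 1
--                 possible_types.append(cur_type)
--             else:
--                 result += s[i]
--                 i += 1
--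
--         s = result
--     return s, possible_types
-- ===== SOURCE B (Python) =====
-- def add_suffix_to_type(s, types):
--     possible_types = []
--     for cur_type in types.keys():
--         low = s.lower()
--         n = len(cur_type)
--         # stage 1: collect the greedy non-overlapping match positions
--         positions = []
--         i = 0
--         while True:
--             p = low.find(cur_type, i)
--             if p == -1:
--                 break
--             positions.append(p)
--             i = p + n
--         # stage 2: assemble the new string from the position list
--         parts = []
--         cnt = types[cur_type]
--         prev = 0
--         for p in positions:
--             parts.append(s[prev:p])
--             parts.append(s[p:p+n] + "_" + str(cnt))
--             cnt += 1
--             prev = p + n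
--         parts.append(s[prev:])
--         s = "".join(parts)
--         # stage 3: bulk bookkeeping
--         types[cur_type] += len(positions)
--         possible_types.extend([cur_type] * len(positions))
--     return s, possible_types
-- ===== Notes on version B (the rewrite author's own statement) =====
-- stated objective: faster
-- what changed: The per-type character-by-character scan is replaced by three staged passes: first collect all greedy non-overlapping match positions with str.find on a precomputed s.lower(), then assemble the new string from whole slices between those positions, then update the count and possible_types in bulk from the number of matches.
-- outside the precondition, e.g. on add_suffix_to_type('', {'': 0}): A returns ('', []), B does not finish within the time limit
import Mathlib
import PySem

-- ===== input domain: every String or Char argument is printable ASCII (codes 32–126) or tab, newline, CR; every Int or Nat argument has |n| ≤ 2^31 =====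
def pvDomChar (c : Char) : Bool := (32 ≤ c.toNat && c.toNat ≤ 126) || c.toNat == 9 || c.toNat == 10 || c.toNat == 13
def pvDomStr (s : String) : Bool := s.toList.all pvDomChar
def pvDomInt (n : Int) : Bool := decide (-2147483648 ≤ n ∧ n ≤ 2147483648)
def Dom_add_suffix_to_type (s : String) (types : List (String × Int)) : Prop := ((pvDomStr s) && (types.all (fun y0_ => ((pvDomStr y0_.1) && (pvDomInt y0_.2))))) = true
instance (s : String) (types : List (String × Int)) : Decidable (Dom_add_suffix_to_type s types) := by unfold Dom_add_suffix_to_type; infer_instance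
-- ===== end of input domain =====

-- B replaces A's character-by-character inner scan with three staged passes per type:
-- collect all greedy non-overlapping match positions (str.find on a precomputed
-- s.lower()), assemble the new string from whole slices between those positions, and
-- update the count / possible_types in bulk from the number of matches (objective:
-- faster in a timing run's measurement; the per-index Python-level loop disappears).
-- Both A and B mutate the `types` dict identically in Python; the equivalence proved
-- here is about the RETURN value (the ports thread the dict as explicit state).

-- ===== PORT A =====
-- inner while-loop of A: scan every index i, match s[i:i+len(t)].lower() == t.
-- `fuel` makes the recursion structural; each iteration advances i by ≥ 1 whenever
-- t ≠ [], so fuel = s.length is enough on every input admitted by Pre_.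
def pvAInner (cur : String) (t s : List Char) (i : Nat) (result : List Char)
    (count : Int) (d : PySem.Dict String Int) (poss : List String) (fuel : Nat) :
    List Char × PySem.Dict String Int × List String :=
  match fuel with
  | 0 => (result, d, poss)
  | fuel + 1 =>
    if i < s.length then
      if PySem.Chars.lower (PySem.List.slice s (some (i : Int)) (some ((i : Int) + (t.length : Int)))) = t then
        pvAInner cur t s (i + t.length)
          (result ++ PySem.List.slice s (some (i : Int)) (some ((i : Int) + (t.length : Int)))
                  ++ '_' :: PySem.Int.toChars count)
          (count + 1) (d.modify cur 0 (· + 1)) (poss ++ [cur]) fuel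
      else
        pvAInner cur t s (i + 1) (result ++ [PySem.List.pyGetD s (i : Int) ' ']) count d poss fuel
    else (result, d, poss)

def add_suffix_to_type (s : String) (types : List (String × Int)) : String × List String :=
  let d0 := PySem.Dict.ofList types
  let st := d0.keys.foldl
    (fun st cur => pvAInner cur cur.toList st.1 0 [] (st.2.1.getD cur 0) st.2.1 st.2.2 st.1.length)
    (s.toList, d0, ([] : List String))
  (String.ofList st.1, st.2.2)

-- ===== PORT B =====
-- stage 1 of B: `while True: p = low.find(t, i); if p == -1: break; append p; i = p + n`.
-- fuel = s.length + 1 covers every iteration when t ≠ [] (i strictly increases).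
def pvBPositions (low t : List Char) (i : Nat) (fuel : Nat) : List Nat :=
  match fuel with
  | 0 => []
  | fuel + 1 =>
    let pos := PySem.Chars.findFrom low t (i : Int) none
    if pos = -1 then []
    else pos.toNat :: pvBPositions low t (pos.toNat + t.length) fuel

-- stage 2 of B: one step of the `for p in positions` assembly loop; state = (parts
-- flattened to chars, cnt, prev).
def pvBAssembleStep (s t : List Char) (st : List Char × Int × Nat) (p : Nat) :
    List Char × Int × Nat :=
  (st.1 ++ PySem.List.slice s (some (st.2.2 : Int)) (some (p : Int))
        ++ PySem.List.slice s (some (p : Int)) (some ((p : Int) + (t.length : Int)))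
        ++ '_' :: PySem.Int.toChars st.2.1,
   st.2.1 + 1, p + t.length)

-- one iteration of B's outer `for cur_type in types.keys()` loop (stages 1–3).
-- `types[cur] += len(positions)` is ported as `modify cur 0` (the key is always
-- present, coming from keys(), so the default 0 is never read).
def pvBTypeStep (cur : String) (st : List Char × PySem.Dict String Int × List String) :
    List Char × PySem.Dict String Int × List String :=
  let t := cur.toList
  let low := PySem.Chars.lower st.1
  let ps := pvBPositions low t 0 (st.1.length + 1)
  let fin := ps.foldl (pvBAssembleStep st.1 t) ([], st.2.1.getD cur 0, 0)
  (fin.1 ++ PySem.List.slice st.1 (some (fin.2.2 : Int)) none,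
   st.2.1.modify cur 0 (· + (ps.length : Int)),
   st.2.2 ++ List.replicate ps.length cur)

def add_suffix_to_type_alt (s : String) (types : List (String × Int)) : String × List String :=
  let d0 := PySem.Dict.ofList types
  let st := d0.keys.foldl (fun st cur => pvBTypeStep cur st) (s.toList, d0, ([] : List String))
  (String.ofList st.1, st.2.2)

-- ===== PRECONDITION & SPEC =====
-- Pre_ excludes dicts containing an empty-string key: there A's inner loop never
-- advances (i += 0) and loops forever on any nonempty s, and B's find-based position
-- loop loops forever even on the empty s (''.find('', 0) == 0); A returns only in the
-- degenerate case s == '' where B diverges.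
def Pre_add_suffix_to_type (s : String) (types : List (String × Int)) : Prop :=
  ∀ p ∈ types, p.1 ≠ ""
instance (s : String) (types : List (String × Int)) : Decidable (Pre_add_suffix_to_type s types) := by
  unfold Pre_add_suffix_to_type; infer_instance

def pvWitness_add_suffix_to_type : String × (List (String × Int)) := ("An int and an Int x", [("int", 0), ("x", 2)])

def Spec_add_suffix_to_type (s : String) (types : List (String × Int)) (out : String × List String) : Prop := out = add_suffix_to_type_alt s types
instance (s : String) (types : List (String × Int)) (out : String × List String) : Decidable (Spec_add_suffix_to_type s types out) := by unfold Spec_add_suffix_to_type; infer_instance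

-- ===== CLAIM (what is proved, stated in full; the proofs are below) =====
def Claim_equal_add_suffix_to_type : Prop := ∀ (s : String) (types : List (String × Int)), Dom_add_suffix_to_type s types → Pre_add_suffix_to_type s types → Spec_add_suffix_to_type s types (add_suffix_to_type s types)

-- ===== LEMMAS AND PROOFS =====

-- A's match test at index i is "t is a prefix of (lower s).drop i".
lemma pvMatchChar (s t : List Char) (i : Nat) :
    (PySem.Chars.lower (PySem.List.slice s (some (i : Int)) (some ((i : Int) + (t.length : Int)))) = t)
      ↔ t <+: (PySem.Chars.lower s).drop i := by
  rw [PySem.List.slice_natCast_add, List.prefix_iff_eq_take]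
  simp [PySem.Chars.lower, List.map_take, List.map_drop, eq_comm]

-- A's scan with no match anywhere from i on: copies the rest of s verbatim.
lemma pvAInner_no_match (cur : String) (t s low : List Char) (hlow : low = PySem.Chars.lower s)
    (fuel : Nat) :
    ∀ (i : Nat) (result : List Char) (count : Int) (d : PySem.Dict String Int) (poss : List String),
    (∀ j, i ≤ j → ¬ t <+: low.drop j) → s.length - i ≤ fuel →
    pvAInner cur t s i result count d poss fuel = (result ++ s.drop i, d, poss) := by
  induction fuel with
  | zero =>
    intro i result count d poss h hfuel
    have h0 : s.drop i = [] := List.drop_eq_nil_of_le (by omega)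
    simp only [pvAInner]
    simp [h0]
  | succ f ih =>
    intro i result count d poss h hfuel
    by_cases hi : i < s.length
    · have hnm : ¬ (PySem.Chars.lower (PySem.List.slice s (some (i : Int)) (some ((i : Int) + (t.length : Int)))) = t) := by
        rw [pvMatchChar, ← hlow]; exact h i le_rfl
      simp only [pvAInner, if_pos hi, if_neg hnm]
      rw [ih (i+1) _ count d poss (fun j hj => h j (by omega)) (by omega)]
      have hdrop : s.drop i = s[i] :: s.drop (i+1) := List.drop_eq_getElem_cons hi
      rw [PySem.List.pyGetD_natCast, List.getD_eq_getElem?_getD, List.getElem?_eq_getElem hi]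
      rw [hdrop]
      simp
    · have h0 : s.drop i = [] := List.drop_eq_nil_of_le (by omega)
      simp only [pvAInner, if_neg hi]
      simp [h0]

-- A's scan with no match on [i, p): copies s[i:p] verbatim and arrives at p.
lemma pvAInner_skip (cur : String) (t s low : List Char) (hlow : low = PySem.Chars.lower s)
    (p : Nat) (hp : p ≤ s.length) (fuel : Nat) :
    ∀ (i : Nat) (result : List Char) (count : Int) (d : PySem.Dict String Int) (poss : List String),
    i ≤ p → (∀ j, i ≤ j → j < p → ¬ t <+: low.drop j) → s.length - i ≤ fuel →
    pvAInner cur t s i result count d poss fuel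
      = pvAInner cur t s p (result ++ (s.drop i).take (p - i)) count d poss (fuel - (p - i)) := by
  induction fuel with
  | zero =>
    intro i result count d poss hip hno hfuel
    have : i = p := by omega
    subst this
    simp
  | succ f ih =>
    intro i result count d poss hip hno hfuel
    rcases Nat.eq_or_lt_of_le hip with rfl | hlt
    · simp
    · have hi : i < s.length := by omega
      have hnm : ¬ (PySem.Chars.lower (PySem.List.slice s (some (i : Int)) (some ((i : Int) + (t.length : Int)))) = t) := by
        rw [pvMatchChar, ← hlow]; exact hno i le_rfl hlt
      simp only [pvAInner, if_pos hi, if_neg hnm]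
      rw [ih (i+1) _ count d poss (by omega) (fun j hj1 hj2 => hno j (by omega) hj2) (by omega)]
      have hdrop : s.drop i = s[i] :: s.drop (i+1) := List.drop_eq_getElem_cons hi
      have htake : (s.drop i).take (p - i) = s[i] :: (s.drop (i+1)).take (p - (i+1)) := by
        rw [hdrop, show p - i = (p - (i+1)) + 1 by omega, List.take_succ_cons]
      have hfuel2 : f - (p - (i+1)) = f + 1 - (p - i) := by omega
      simp [PySem.List.pyGetD_natCast, List.getElem?_eq_getElem hi, htake, hfuel2]

-- one matching step of A at a match position p.
lemma pvAInner_match_step (cur : String) (t s low : List Char) (hlow : low = PySem.Chars.lower s)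
    (p : Nat) (hp : p < s.length) (hpre : t <+: low.drop p)
    (result : List Char) (count : Int) (d : PySem.Dict String Int) (poss : List String)
    (fuel : Nat) (hfuel : 1 ≤ fuel) :
    pvAInner cur t s p result count d poss fuel
      = pvAInner cur t s (p + t.length)
          (result ++ (s.drop p).take t.length ++ '_' :: PySem.Int.toChars count)
          (count + 1) (d.modify cur 0 (· + 1)) (poss ++ [cur]) (fuel - 1) := by
  obtain ⟨f, rfl⟩ : ∃ f, fuel = f + 1 := ⟨fuel - 1, by omega⟩
  have hm : PySem.Chars.lower (PySem.List.slice s (some (p : Int)) (some ((p : Int) + (t.length : Int)))) = t := by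
    rw [pvMatchChar, ← hlow]; exact hpre
  simp only [pvAInner, if_pos hp, if_pos hm]
  rw [PySem.List.slice_natCast_add]
  simp

-- two successive `d[c] += …` updates compose into one bulk update.
lemma pvModify_modify (d : PySem.Dict String Int) (c : String) (f g : Int → Int) :
    (d.modify c 0 f).modify c 0 g = d.modify c 0 (fun v => g (f v)) := by
  simp [PySem.Dict.modify, PySem.Dict.getD_insert_self, PySem.Dict.insert_insert_self]

-- re-inserting a key's own value is the identity (unique keys, key present).
lemma pvInsert_getD_self (d : PySem.Dict String Int) (c : String)
    (h : d.contains c = true) (hnd : d.keys.Nodup) :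
    d.insert c (d.getD c 0) = d := by
  apply PySem.Dict.ext
  rw [PySem.Dict.items_insert_of_contains]
  · conv_rhs => rw [← List.map_id d.items]
    apply List.map_congr_left
    intro p hp
    by_cases hc : p.1 = c
    · have hm : (c, p.2) ∈ d.items := by rw [← hc]; exact hp
      have hg := PySem.Dict.getD_of_mem_items d hm hnd (d0 := (0:Int))
      simp [hc, hg, Prod.ext_iff]
    · simp [hc]
  · exact h

-- `d[c] += 0` (an identity update) leaves the dict unchanged when c is a key.
lemma pvModify_id (d : PySem.Dict String Int) (c : String)
    (h : d.contains c = true) (hnd : d.keys.Nodup) :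
    d.modify c 0 (fun v => v) = d := by
  show d.insert c (d.getD c 0) = d
  exact pvInsert_getD_self d c h hnd

-- main inner-loop equivalence: A's char scan equals B's three staged passes.
lemma pvInner_eq (cur : String) (t s low : List Char) (hlow : low = PySem.Chars.lower s)
    (ht : t ≠ []) (fuelB : Nat) :
    ∀ (i : Nat) (result : List Char) (count : Int) (d : PySem.Dict String Int) (poss : List String)
      (fuelA : Nat),
    i ≤ s.length → count = d.getD cur 0 → d.contains cur = true → d.keys.Nodup →
    s.length - i ≤ fuelA → s.length - i < fuelB →
    pvAInner cur t s i result count d poss fuelA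
      = (((pvBPositions low t i fuelB).foldl (pvBAssembleStep s t) (result, count, i)).1
           ++ PySem.List.slice s (some ((((pvBPositions low t i fuelB).foldl (pvBAssembleStep s t) (result, count, i)).2.2 : Nat) : Int)) none,
         d.modify cur 0 (· + ((pvBPositions low t i fuelB).length : Int)),
         poss ++ List.replicate (pvBPositions low t i fuelB).length cur) := by
  induction fuelB with
  | zero => intro i result count d poss fuelA hi hcnt hcon hnd hA hB; omega
  | succ fB ih =>
    intro i result count d poss fuelA hi hcnt hcon hnd hA hB
    have hlen : low.length = s.length := by simp [hlow, PySem.Chars.lower]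
    by_cases hpos : PySem.Chars.findFrom low t (i : Int) none = -1
    · have hps : pvBPositions low t i (fB + 1) = [] := by
        simp only [pvBPositions, if_pos hpos]
      have hninf : ¬ t <:+: low.drop i :=
        (PySem.Chars.findFrom_natCast_eq_neg_one_iff low t i (by omega)).mp hpos
      have hno : ∀ j, i ≤ j → ¬ t <+: low.drop j := by
        intro j hij hpre
        apply hninf
        rw [← PySem.Chars.isIn_iff_infix, ← PySem.Chars.exists_prefix_drop_iff_isIn]
        exact ⟨j - i, by rwa [List.drop_drop, Nat.add_sub_cancel' hij]⟩
      rw [pvAInner_no_match cur t s low hlow fuelA i result count d poss hno hA, hps]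
      simp [PySem.List.slice_from_natCast, pvModify_id d cur hcon hnd]
    · obtain ⟨hip, hpre, hmin⟩ :=
        PySem.Chars.findFrom_natCast_spec low t i (by omega) hpos
      have htl : 1 ≤ t.length := List.length_pos_of_ne_nil ht
      have hpos0 : 0 ≤ PySem.Chars.findFrom low t (i : Int) none := le_trans (by omega) hip
      set pz := PySem.Chars.findFrom low t (i : Int) none with hpz
      set p := pz.toNat with hpdef
      have hipn : i ≤ p := by omega
      have hpl : p < s.length := by
        by_contra hc
        have hnil : low.drop p = [] := List.drop_eq_nil_of_le (by omega)
        rw [hnil] at hpre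
        exact ht (List.prefix_nil.mp hpre)
      have hplen : p + t.length ≤ s.length := by
        have hl2 := hpre.length_le
        simp [List.length_drop, hlen] at hl2
        omega
      have hps : pvBPositions low t i (fB + 1) = p :: pvBPositions low t (p + t.length) fB := by
        simp only [pvBPositions, if_neg hpos, ← hpz, ← hpdef]
      -- run A up to the match and through it
      rw [pvAInner_skip cur t s low hlow p (by omega) fuelA i result count d poss hipn
            (fun j h1 h2 => hmin j h1 h2) hA]
      rw [pvAInner_match_step cur t s low hlow p hpl hpre _ count d poss _ (by omega)]
      -- apply the IH at the position after the match
      rw [ih (p + t.length) _ (count + 1) _ _ (fuelA - (p - i) - 1) (by omega)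
            (by rw [PySem.Dict.getD_modify_self, hcnt])
            (by rw [PySem.Dict.contains_modify]; simp)
            (by rw [PySem.Dict.keys_modify]
                exact PySem.Dict.nodup_keys_insert _ _ _ hnd)
            (by omega) (by omega)]
      rw [hps]
      refine congrArg₂ Prod.mk ?_ (congrArg₂ Prod.mk ?_ ?_)
      · -- string component: one assembly step absorbed into the fold's initial state
        have hstep : pvBAssembleStep s t (result, count, i) p
            = (result ++ (s.drop i).take (p - i) ++ (s.drop p).take t.length ++ '_' :: PySem.Int.toChars count,
               count + 1, p + t.length) := by
          simp [pvBAssembleStep, PySem.List.slice_natCast, PySem.List.slice_natCast_add,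
                List.append_assoc]
        simp only [List.foldl_cons, hstep]
      · -- dict component: (+1) then (+k) is (+(k+1))
        rw [pvModify_modify]
        congr 1
        funext v
        push_cast [List.length_cons]
        ring
      · -- possible_types component
        simp [List.replicate_succ]

-- every key of the dict built from `types` is a first component of `types`.
lemma pvMem_keys_ofList (types : List (String × Int)) (cur : String)
    (h : cur ∈ (PySem.Dict.ofList types).keys) : cur ∈ types.map Prod.fst := by
  have hof : PySem.Dict.ofList types
      = types.foldl (fun d (p : String × Int) => d.insert p.1 p.2) PySem.Dict.empty := rfl
  rw [hof, PySem.Dict.keys_foldl_insert_key types Prod.fst (fun _ p => p.2) PySem.Dict.empty] at h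
  simpa [PySem.Dict.keys_empty, PySem.Set.update_nil_left, PySem.Set.mem_ofList] using h

-- the outer fold, with the invariant that the threaded dict keeps the keys of d0.
lemma pvOuter_eq (types : List (String × Int)) (hpre : ∀ p ∈ types, p.1 ≠ "") :
    ∀ (ks : List String), (∀ c ∈ ks, c ∈ (PySem.Dict.ofList types).keys) →
    ∀ (st : List Char × PySem.Dict String Int × List String),
    st.2.1.keys = (PySem.Dict.ofList types).keys →
    ks.foldl (fun st cur => pvAInner cur cur.toList st.1 0 [] (st.2.1.getD cur 0) st.2.1 st.2.2 st.1.length) st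
      = ks.foldl (fun st cur => pvBTypeStep cur st) st := by
  intro ks
  induction ks with
  | nil => intro _ _ _; rfl
  | cons cur ks ih =>
    intro hks st hkeys
    have hcur : cur ∈ (PySem.Dict.ofList types).keys := hks cur (by simp)
    have hne : cur ≠ "" := by
      obtain ⟨p, hp, hfst⟩ := List.mem_map.mp (pvMem_keys_ofList types cur hcur)
      exact hfst ▸ hpre p hp
    have ht : cur.toList ≠ [] := by
      intro h0
      exact hne (by simpa using congrArg String.ofList h0)
    have hcon : st.2.1.contains cur = true := by
      rw [PySem.Dict.contains_iff_mem_keys, hkeys]; exact hcur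
    have hnd : st.2.1.keys.Nodup := by
      rw [hkeys]; exact PySem.Dict.nodup_keys_ofList types
    have hstep : pvAInner cur cur.toList st.1 0 [] (st.2.1.getD cur 0) st.2.1 st.2.2 st.1.length
        = pvBTypeStep cur st := by
      rw [pvInner_eq cur cur.toList st.1 (PySem.Chars.lower st.1) rfl ht (st.1.length + 1)
            0 [] (st.2.1.getD cur 0) st.2.1 st.2.2 st.1.length (by omega) rfl hcon hnd
            (by omega) (by omega)]
      rfl
    have hkeys' : (pvBTypeStep cur st).2.1.keys = (PySem.Dict.ofList types).keys := by
      show ((st.2.1.modify cur 0 _).keys) = _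
      rw [PySem.Dict.keys_modify, PySem.Dict.keys_insert_of_contains _ _ hcon, hkeys]
    simp only [List.foldl_cons, hstep]
    exact ih (fun c hc => hks c (by simp [hc])) (pvBTypeStep cur st) hkeys'

-- ===== VERDICT (by name: the statement is the Claim_ definition above) =====
theorem add_suffix_to_type_spec : Claim_equal_add_suffix_to_type := by
  intro s types hdom hpre
  unfold Spec_add_suffix_to_type add_suffix_to_type add_suffix_to_type_alt
  exact congrArg (fun st : List Char × PySem.Dict String Int × List String => (String.ofList st.1, st.2.2))
    (pvOuter_eq types hpre (PySem.Dict.ofList types).keys (fun c hc => hc)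
      (s.toList, PySem.Dict.ofList types, ([] : List String)) rfl)
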